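-- pv_equiv track=rewrite | github.com/avi3tal/knowledgebase | interviewbit/courses/programming/strings/count_and_say.py | predic_next
-- ===== SOURCE A (Python) =====
-- def predic_next(prev):
--     res = ""
--     cnt = 1
--     last = prev[0]
--     for i in prev[1:]:
--         if i != last:
--             res += f"{cnt}{last}"
--             cnt = 1
--             last = i
--         else:
--             cnt += 1
--     res += f"{cnt}{last}"
--
--     return res
-- ===== SOURCE B (Python) =====
-- def predic_next(prev):
--     # Run-length encode by scanning whole runs with two indices,
--     # collecting parts and joining once (no per-char accumulator state).
--     parts = []
--     i = 0
--     n = len(prev)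
--     while i < n:
--         j = i + 1
--         while j < n and prev[j] == prev[i]:
--             j += 1
--         parts.append(str(j - i) + prev[i])
--         i = j
--     return ''.join(parts)
-- ===== Notes on version B (the rewrite author's own statement) =====
-- stated objective: alternative
-- what changed: B replaces A's per-character fold with cnt/last accumulator state by a two-index run scanner that consumes each maximal run at once, collects the encoded parts in a list and joins once; B naturally returns '' on empty input where A raises IndexError, so Pre_ excludes the empty string.
-- outside the precondition, e.g. on predic_next(''): A raises IndexError, B returns ''
import Mathlib
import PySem

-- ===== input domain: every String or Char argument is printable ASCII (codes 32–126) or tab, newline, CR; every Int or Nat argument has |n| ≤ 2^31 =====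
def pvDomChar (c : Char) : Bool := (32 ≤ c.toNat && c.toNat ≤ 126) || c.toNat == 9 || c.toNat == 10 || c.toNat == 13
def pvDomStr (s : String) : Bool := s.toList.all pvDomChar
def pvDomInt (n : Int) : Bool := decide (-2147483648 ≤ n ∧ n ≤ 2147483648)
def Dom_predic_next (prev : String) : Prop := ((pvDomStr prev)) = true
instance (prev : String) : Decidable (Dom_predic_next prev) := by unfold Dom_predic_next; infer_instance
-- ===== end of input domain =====

-- B replaces A's per-character cnt/last accumulator by a two-index run scanner that
-- consumes each maximal run at once and joins the parts; same cost, different decomposition.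

-- ===== PORT A =====
-- for-loop body of A: state (res, cnt, last)
def stepA (st : String × Int × Char) (i : Char) : String × Int × Char :=
  match st with
  | (res, cnt, last) =>
    if i ≠ last then (res ++ PySem.Int.toStr cnt ++ String.singleton last, 1, i)
    else (res, cnt + 1, last)

def predic_next (prev : String) : String :=
  match prev.toList with
  | [] => ""   -- prev[0] raises IndexError here; excluded by Pre_predic_next
  | c :: rest =>
    match rest.foldl stepA ("", 1, c) with
    | (res, cnt, last) => res ++ PySem.Int.toStr cnt ++ String.singleton last

-- ===== PORT B =====
-- inner while loop of B: advance j over the run of prev[i]; returns (j - i - 1, rest after the run)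
def altCount (c : Char) : List Char → Nat × List Char
  | [] => (0, [])
  | x :: xs => if x = c then ((altCount c xs).1 + 1, (altCount c xs).2) else (0, x :: xs)

theorem altCount_len (c : Char) (l : List Char) : (altCount c l).2.length ≤ l.length := by
  induction l with
  | nil => simp [altCount]
  | cons x xs ih =>
    simp only [altCount]
    split
    · simpa using Nat.le_succ_of_le ih
    · simp

-- outer while loop of B: one part per maximal run
def altRuns : List Char → List String
  | [] => []
  | c :: xs =>
    (PySem.Int.toStr (((altCount c xs).1 : Int) + 1) ++ String.singleton c) :: altRuns (altCount c xs).2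
  termination_by l => l.length
  decreasing_by
    exact Nat.lt_succ_of_le (altCount_len _ _)

def predic_next_alt (prev : String) : String := String.join (altRuns prev.toList)

-- ===== PRECONDITION & SPEC =====
-- Pre_ excludes exactly the empty string, on which A raises IndexError at prev[0].
def Pre_predic_next (prev : String) : Prop := prev ≠ ""
instance (prev : String) : Decidable (Pre_predic_next prev) := by unfold Pre_predic_next; infer_instance
def pvWitness_predic_next : String := "1211"

def Spec_predic_next (prev : String) (out : String) : Prop := out = predic_next_alt prev
instance (prev : String) (out : String) : Decidable (Spec_predic_next prev out) := by unfold Spec_predic_next; infer_instance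

-- ===== CLAIM (what is proved, stated in full; the proofs are below) =====
def Claim_equal_predic_next : Prop := ∀ (prev : String), Dom_predic_next prev → Pre_predic_next prev → Spec_predic_next prev (predic_next prev)

-- ===== LEMMAS AND PROOFS =====

theorem join_foldl : ∀ (L : List String) (a : String),
    List.foldl (fun r s => r ++ s) a L = a ++ String.join L := by
  intro L
  induction L with
  | nil => intro a; simp [String.join]
  | cons s t ih =>
    intro a
    show List.foldl (fun r s => r ++ s) (a ++ s) t = a ++ String.join (s :: t)
    rw [ih]
    have : String.join (s :: t) = s ++ String.join t := by
      show List.foldl (fun r s => r ++ s) ("" ++ s) t = _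
      rw [ih]; simp
    rw [this]
    apply String.toList_injective
    simp

theorem join_cons (s : String) (t : List String) : String.join (s :: t) = s ++ String.join t := by
  show List.foldl (fun r s => r ++ s) ("" ++ s) t = _
  rw [join_foldl]
  apply String.toList_injective
  simp

theorem fold_runs (l : List Char) : ∀ (res : String) (cnt : Int) (last : Char),
    (l.foldl stepA (res, cnt, last)).1 ++ PySem.Int.toStr (l.foldl stepA (res, cnt, last)).2.1
      ++ String.singleton (l.foldl stepA (res, cnt, last)).2.2
    = res ++ PySem.Int.toStr (cnt + ((altCount last l).1 : Int)) ++ String.singleton last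
        ++ String.join (altRuns (altCount last l).2) := by
  induction l with
  | nil =>
    intro res cnt last
    simp [altCount, altRuns, String.join]
  | cons x xs ih =>
    intro res cnt last
    by_cases h : x = last
    · subst h
      simp only [List.foldl_cons, stepA, ne_eq, not_true_eq_false, if_false]
      rw [ih]
      simp only [altCount, if_true]
      have hc : ∀ m : Nat, cnt + (((m + 1 : Nat)) : Int) = cnt + 1 + (m : Int) := by
        intro m; push_cast; ring
      rw [hc]
    · simp only [List.foldl_cons, stepA, ne_eq, if_pos h]
      rw [ih]
      simp only [altCount, if_neg h, Nat.cast_zero, add_zero]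
      have hj : altRuns (x :: xs)
          = (PySem.Int.toStr (((altCount x xs).1 : Int) + 1) ++ String.singleton x)
            :: altRuns (altCount x xs).2 := by rw [altRuns]
      rw [hj, join_cons, add_comm ((altCount x xs).1 : Int) 1]
      apply String.toList_injective
      simp

theorem toList_ne_nil (prev : String) (h : prev ≠ "") : prev.toList ≠ [] := by
  intro hnil
  exact h (by rwa [← String.toList_eq_nil_iff])

-- ===== VERDICT (by name: the statement is the Claim_ definition above) =====
theorem predic_next_spec : Claim_equal_predic_next := by
  intro prev _ hpre
  unfold Spec_predic_next predic_next predic_next_alt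
  have hne := toList_ne_nil prev hpre
  cases hl : prev.toList with
  | nil => exact absurd hl hne
  | cons c rest =>
    show (rest.foldl stepA ("", 1, c)).1 ++ PySem.Int.toStr (rest.foldl stepA ("", 1, c)).2.1
        ++ String.singleton (rest.foldl stepA ("", 1, c)).2.2 = String.join (altRuns (c :: rest))
    rw [fold_runs]
    have hj : altRuns (c :: rest)
        = (PySem.Int.toStr (((altCount c rest).1 : Int) + 1) ++ String.singleton c)
          :: altRuns (altCount c rest).2 := by rw [altRuns]
    rw [hj, join_cons, add_comm ((altCount c rest).1 : Int) 1]
    apply String.toList_injective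
    simp
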